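-- pv_equiv track=rewrite | github.com/cui-z/LeetCode | 比前面大后面小的数--.py | slove
-- ===== SOURCE A (Python) =====
-- def slove(nums):
--     r_min=nums[-1]
--     r_nums = [float("inf")]
--     result=[]
--
--     for i in range(len(nums)-1,-1,-1):
--         if nums[i] < r_min:
--             r_min = nums[i]
--         r_nums.append(r_min)
--
--     l_max = -float('inf')
--     for i in range(len(nums)):
--         if nums[i] > l_max:
--             l_max=nums[i]
--             if nums[i] < r_nums[::-1][i+1]:
--                 result.append(nums[i])
--     return result
-- ===== SOURCE B (Python) =====
-- def slove(nums):
--     # One-pass monotonic-stack algorithm: keep a stack of surviving candidates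
--     # (prefix maxima not yet contradicted); each new element pops the candidates
--     # it invalidates (those >= it) and is pushed iff it is a new prefix maximum.
--     stack = []
--     cur_max = None
--     for x in nums:
--         while stack and stack[-1] >= x:
--             stack.pop()
--         if cur_max is None or x > cur_max:
--             cur_max = x
--             stack.append(x)
--     return stack
-- ===== Notes on version B (the rewrite author's own statement) =====
-- stated objective: faster
-- what changed: A builds a suffix-min array and re-reverses it with a slice on every iteration of its second scan (quadratic); B is a single left-to-right pass with a monotonic stack of candidates, popping candidates invalidated by each new element, with no auxiliary arrays at all.
import Mathlib
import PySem

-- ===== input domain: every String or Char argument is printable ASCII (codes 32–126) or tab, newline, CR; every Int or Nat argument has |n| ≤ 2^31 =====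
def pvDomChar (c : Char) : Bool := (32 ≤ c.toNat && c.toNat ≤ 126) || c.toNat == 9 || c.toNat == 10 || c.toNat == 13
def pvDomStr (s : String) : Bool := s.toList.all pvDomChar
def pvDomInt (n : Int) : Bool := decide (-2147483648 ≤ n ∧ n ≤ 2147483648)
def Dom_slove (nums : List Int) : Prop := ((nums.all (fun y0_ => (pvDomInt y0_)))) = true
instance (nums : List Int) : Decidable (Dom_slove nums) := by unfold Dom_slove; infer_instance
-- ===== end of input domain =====

-- B replaces A's staged passes (suffix-min array re-reversed by a slice inside the second scan)
-- by a single left-to-right pass with a monotonic stack of candidates; return value only,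
-- neither version mutates its argument.

-- ===== PORT A =====
-- float("inf") / -float("inf") are modelled as `none : Option Int`; the only comparisons Python
-- performs on them are int-vs-inf (always true in the direction used), which ltB/ltT mirror exactly.
def ltB (o : Option Int) (x : Int) : Bool :=   -- "x > o" where o is an int or -inf
  match o with | none => true | some v => decide (v < x)

def ltT (x : Int) (o : Option Int) : Bool :=   -- "x < o" where o is an int or +inf
  match o with | none => true | some v => decide (x < v)

def sloveStep1 (nums : List Int) (st : Int × List (Option Int)) (i : Int) : Int × List (Option Int) :=
  let x := PySem.List.pyGetD nums i 0
  let r := if x < st.1 then x else st.1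
  (r, st.2 ++ [some r])

def sloveStep2 (nums : List Int) (rnums : List (Option Int)) (st : Option Int × List Int) (i : Int) :
    Option Int × List Int :=
  let x := PySem.List.pyGetD nums i 0
  if ltB st.1 x then
    if ltT x (PySem.List.pyGetD ((PySem.List.slice? rnums none none (-1)).getD []) (i + 1) none) then
      (some x, st.2 ++ [x])
    else (some x, st.2)
  else st

def slove (nums : List Int) : List Int :=
  match PySem.List.pyGet? nums (-1) with
  | none => []   -- Python raises IndexError here (nums = []); excluded by Pre_slove
  | some r0 =>
    let rnums := ((PySem.List.pyRange ((nums.length : Int) - 1) (-1) (-1)).foldl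
        (sloveStep1 nums) (r0, [(none : Option Int)])).2
    ((PySem.List.pyRange 0 (nums.length : Int) 1).foldl
        (sloveStep2 nums rnums) ((none : Option Int), [])).2

-- ===== PORT B =====
-- 'while stack and stack[-1] >= x: stack.pop()' — recursion on the stack's length
def popGE (x : Int) (st : List Int) : List Int :=
  match h : st.getLast? with
  | none => st
  | some c => if x ≤ c then popGE x st.dropLast else st
termination_by st.length
decreasing_by
  have hne : st ≠ [] := by intro e; subst e; simp at h
  have := List.length_pos_of_ne_nil hne
  simp only [List.length_dropLast]
  omega

def altStep (st : Option Int × List Int) (x : Int) : Option Int × List Int :=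
  let s := popGE x st.2
  match st.1 with
  | none => (some x, s ++ [x])
  | some m => if m < x then (some x, s ++ [x]) else (some m, s)

def slove_alt (nums : List Int) : List Int := (nums.foldl altStep (none, [])).2

-- ===== PRECONDITION & SPEC =====
-- Pre_ excludes only the empty list, on which Python A raises IndexError (nums[-1]).
def Pre_slove (nums : List Int) : Prop := nums ≠ []
instance (nums : List Int) : Decidable (Pre_slove nums) := by unfold Pre_slove; infer_instance
def pvWitness_slove : List Int := [3, 1, 4, 5, 2]

def Spec_slove (nums : List Int) (out : List Int) : Prop := out = slove_alt nums
instance (nums : List Int) (out : List Int) : Decidable (Spec_slove nums out) := by unfold Spec_slove; infer_instance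

-- ===== CLAIM (what is proved, stated in full; the proofs are below) =====
def Claim_equal_slove : Prop := ∀ (nums : List Int), Dom_slove nums → Pre_slove nums → Spec_slove nums (slove nums)

-- ===== LEMMAS AND PROOFS =====

-- the common characterisation both ports are reduced to: element k is kept iff it exceeds the
-- max of everything before it (none = -inf) and is below the min of everything after it (none = +inf)
def foldMaxO (o : Option Int) (l : List Int) : Option Int :=
  l.foldl (fun o x => some (match o with | none => x | some m => max m x)) o

def sTo (l : List Int) : Option Int :=
  l.foldr (fun x o => some (match o with | none => x | some m => min x m)) none

def canonStep (nums : List Int) (res : List Int) (k : Nat) : List Int :=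
  if ltB (foldMaxO none (nums.take k)) (nums.getD k 0)
      && ltT (nums.getD k 0) (sTo (nums.drop (k + 1)))
  then res ++ [nums.getD k 0] else res

def canon (nums : List Int) : List Int := (List.range nums.length).foldl (canonStep nums) []

def imin (r : Int) (l : List Int) : Int := l.foldr min r

lemma if_lt_eq_min (a b : Int) : (if a < b then a else b) = min a b := by
  rw [min_def]; split_ifs <;> omega

lemma loop1 (nums : List Int) : ∀ (m : Nat), m ≤ nums.length → ∀ (r : Int) (acc : List (Option Int)),
    (PySem.List.pyRange ((m : Int) - 1) (-1) (-1)).foldl (sloveStep1 nums) (r, acc)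
    = (imin r (nums.take m),
       acc ++ ((List.range m).map (fun j => some (imin r ((nums.take m).drop j)))).reverse)
  | 0, _, r, acc => by
    rw [show ((0 : Nat) : Int) - 1 = -1 by norm_num, PySem.List.pyRange_neg_one_eq_nil (by norm_num)]
    simp [imin]
  | m + 1, hm, r, acc => by
    have hmlt : m < nums.length := by omega
    have h1 : ((m + 1 : Nat) : Int) - 1 = (m : Int) := by push_cast; ring
    rw [h1, PySem.List.pyRange_neg_one_cons (by omega)]
    simp only [List.foldl_cons]
    have hstep : sloveStep1 nums (r, acc) (m : Int)
        = (min (nums.getD m 0) r, acc ++ [some (min (nums.getD m 0) r)]) := by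
      simp [sloveStep1, PySem.List.pyGetD_natCast, if_lt_eq_min]
    rw [hstep, loop1 nums m (by omega) _ _]
    have hlen : (nums.take m).length = m := by simp [List.length_take]; omega
    have htake : nums.take (m + 1) = nums.take m ++ [nums.getD m 0] := by
      rw [List.take_succ_eq_append_getElem hmlt, List.getD_eq_getElem _ _ hmlt]
    refine Prod.ext ?_ ?_
    · show imin (min (nums.getD m 0) r) (nums.take m) = imin r (nums.take (m + 1))
      rw [htake]
      simp [imin, List.foldr_append]
    · show acc ++ [some (min (nums.getD m 0) r)] ++ _ = _
      simp only [List.range_succ, List.map_append, List.reverse_append, List.map_cons, List.map_nil,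
        List.reverse_cons, List.reverse_nil, List.nil_append]
      have hGm : (nums.take (m + 1)).drop m = [nums.getD m 0] := by
        have h2 := List.drop_left (l₁ := nums.take m) (l₂ := [nums.getD m 0])
        rw [hlen] at h2
        rw [htake, h2]
      have hmap : (List.range m).map (fun j => some (imin r ((nums.take (m + 1)).drop j)))
          = (List.range m).map (fun j => some (imin (min (nums.getD m 0) r) ((nums.take m).drop j))) := by
        refine List.map_congr_left ?_
        intro j hj
        have hjm : j ≤ m := le_of_lt (List.mem_range.mp hj)
        rw [htake, List.drop_append_of_le_length (by omega)]
        simp [imin, List.foldr_append]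
      rw [hmap, hGm]
      simp [imin, List.append_assoc]

lemma sTo_getLast : ∀ (l : List Int) (h : l ≠ []), sTo l = some (l.foldr min (l.getLast h))
  | [x], _ => by simp [sTo]
  | x :: y :: t, _ => by
    have ih := sTo_getLast (y :: t) (by simp)
    simp only [sTo, List.foldr_cons] at ih ⊢
    rw [List.getLast_cons (by simp)]
    simp only [Option.some.injEq] at ih
    rw [ih]

lemma foldMaxO_append (o : Option Int) (l : List Int) (x : Int) :
    foldMaxO o (l ++ [x]) = some (match foldMaxO o l with | none => x | some m => max m x) := by
  simp [foldMaxO, List.foldl_append]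

lemma loop2 (nums : List Int) (rnums : List (Option Int))
    (hR : ∀ k : Nat, k ≤ nums.length →
      PySem.List.pyGetD ((PySem.List.slice? rnums none none (-1)).getD []) ((k : Int)) none
      = sTo (nums.drop k)) :
    ∀ (m : Nat), m ≤ nums.length →
    (PySem.List.pyRange 0 (m : Int) 1).foldl (sloveStep2 nums rnums) ((none : Option Int), [])
    = (foldMaxO none (nums.take m), (List.range m).foldl (canonStep nums) [])
  | 0, _ => by
    rw [show ((0 : Nat) : Int) = 0 by norm_num, PySem.List.pyRange_one_eq_nil (by norm_num)]
    simp [foldMaxO]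
  | m + 1, hm => by
    have hmlt : m < nums.length := by omega
    have h1 : ((m + 1 : Nat) : Int) = (m : Int) + 1 := by push_cast; ring
    rw [h1, PySem.List.pyRange_one_succ_right (by omega), List.foldl_append]
    rw [loop2 nums rnums hR m (by omega)]
    simp only [List.foldl_cons, List.foldl_nil]
    have hx : PySem.List.pyGetD nums ((m : Nat) : Int) 0 = nums.getD m 0 :=
      PySem.List.pyGetD_natCast nums m 0
    have hlook : PySem.List.pyGetD ((PySem.List.slice? rnums none none (-1)).getD [])
        ((m : Int) + 1) none = sTo (nums.drop (m + 1)) := by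
      have h2 := hR (m + 1) (by omega)
      push_cast at h2
      exact h2
    rw [List.range_succ, List.foldl_append, List.foldl_cons, List.foldl_nil]
    have htake : nums.take (m + 1) = nums.take m ++ [nums.getD m 0] := by
      rw [List.take_succ_eq_append_getElem hmlt, List.getD_eq_getElem _ _ hmlt]
    set P := (List.range m).foldl (canonStep nums) [] with hP
    simp only [sloveStep2, hx, hlook]
    rw [htake, foldMaxO_append]
    simp only [canonStep]
    cases hmo : foldMaxO none (nums.take m) with
    | none =>
      cases hlt : ltT (nums.getD m 0) (sTo (nums.drop (m + 1))) <;> simp [ltB, List.getD]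
    | some v =>
      by_cases hv : v < nums[m]?.getD 0
      · have hmax : max v (nums[m]?.getD 0) = nums[m]?.getD 0 := max_eq_right (le_of_lt hv)
        cases hlt : ltT (nums.getD m 0) (sTo (nums.drop (m + 1))) <;>
          simp [ltB, hv, hmax, List.getD]
      · have hmax : max v (nums[m]?.getD 0) = v := max_eq_left (by omega)
        simp [ltB, hv, hmax, List.getD]

lemma sTo_drop (nums : List Int) (h : nums ≠ []) (k : Nat) (hk : k < nums.length) :
    sTo (nums.drop k) = some (imin (nums.getLast h) (nums.drop k)) := by
  have hne : nums.drop k ≠ [] := by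
    intro hd
    have := List.drop_eq_nil_iff.mp hd
    omega
  rw [sTo_getLast (nums.drop k) hne, List.getLast_drop hne]
  rfl

lemma A_eq_canon (nums : List Int) (h : nums ≠ []) : slove nums = canon nums := by
  have hlast : PySem.List.pyGet? nums (-1) = some (nums.getLast h) := by
    rw [PySem.List.pyGet?_neg_one, List.getLast?_eq_some_getLast]
  unfold slove
  rw [hlast]
  dsimp only
  rw [loop1 nums nums.length le_rfl (nums.getLast h) [none]]
  rw [List.take_length]
  have hR : ∀ k : Nat, k ≤ nums.length →
      PySem.List.pyGetD ((PySem.List.slice?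
          (([none] : List (Option Int)) ++
            ((List.range nums.length).map (fun j => some (imin (nums.getLast h) (nums.drop j)))).reverse)
          none none (-1)).getD []) ((k : Int)) none
      = sTo (nums.drop k) := by
    intro k hk
    rw [PySem.List.slice?_none_none_neg_one, Option.getD_some, List.reverse_append,
      List.reverse_reverse]
    simp only [List.reverse_cons, List.reverse_nil, List.nil_append]
    rw [PySem.List.pyGetD_natCast]
    rcases lt_or_eq_of_le hk with hlt | heq
    · rw [List.getD_eq_getElem _ _ (by simp; omega)]
      rw [List.getElem_append_left (by simp; omega)]
      rw [sTo_drop nums h k hlt]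
      simp
    · subst heq
      rw [List.getD_eq_getElem _ _ (by simp)]
      rw [List.getElem_append_right (by simp)]
      simp [sTo, List.drop_length]
  rw [loop2 nums _ hR nums.length le_rfl]
  rfl

-- ---- B side ----

def keepF (nums : List Int) (t k : Nat) : Bool :=
  ltB (foldMaxO none (nums.take k)) (nums.getD k 0)
    && ltT (nums.getD k 0) (sTo ((nums.take t).drop (k + 1)))

def stackAt (nums : List Int) (t : Nat) : List Int :=
  ((List.range t).filter (keepF nums t)).map (fun k => nums.getD k 0)

lemma popGE_nil (x : Int) : popGE x [] = [] := by
  rw [popGE]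
  split
  · rfl
  · next c h => simp at h

lemma popGE_concat (x c : Int) (l : List Int) :
    popGE x (l ++ [c]) = if x ≤ c then popGE x l else l ++ [c] := by
  rw [popGE]
  split
  · next h => simp at h
  · next c' h =>
    rw [List.getLast?_concat] at h
    injection h with h
    subst h
    rw [List.dropLast_concat]

lemma sTo_concat (l : List Int) (x : Int) :
    sTo (l ++ [x]) = some (match sTo l with | none => x | some m => min m x) := by
  induction l with
  | nil => rfl
  | cons a t ih =>
    have h1 : sTo (a :: (t ++ [x]))
        = some (match sTo (t ++ [x]) with | none => a | some m => min a m) := rfl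
    have h2 : sTo (a :: t) = some (match sTo t with | none => a | some m => min a m) := rfl
    rw [List.cons_append, h1, ih, h2]
    cases sTo t with
    | none => rfl
    | some m => show some (min a (min m x)) = some (min (min a m) x); rw [min_assoc]

lemma ltT_concat (v : Int) (l : List Int) (x : Int) :
    ltT v (sTo (l ++ [x])) = (ltT v (sTo l) && decide (v < x)) := by
  rw [sTo_concat]
  cases h : sTo l with
  | none => simp [ltT]
  | some m => simp [ltT]

lemma keepF_lt (nums : List Int) (t k : Nat) (hk : k < t) (ht : t < nums.length) :
    keepF nums (t + 1) k = (keepF nums t k && decide (nums.getD k 0 < nums.getD t 0)) := by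
  have htake : nums.take (t + 1) = nums.take t ++ [nums.getD t 0] := by
    rw [List.take_succ_eq_append_getElem ht, List.getD_eq_getElem _ _ ht]
  have hdrop : (nums.take (t + 1)).drop (k + 1) = (nums.take t).drop (k + 1) ++ [nums.getD t 0] := by
    rw [htake, List.drop_append_of_le_length (by simp [List.length_take]; omega)]
  unfold keepF
  rw [hdrop, ltT_concat, Bool.and_assoc]

lemma keepF_self (nums : List Int) (t : Nat) (ht : t < nums.length) :
    keepF nums (t + 1) t = ltB (foldMaxO none (nums.take t)) (nums.getD t 0) := by
  unfold keepF
  have : (nums.take (t + 1)).drop (t + 1) = [] :=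
    List.drop_eq_nil_of_le (by simp [List.length_take])
  rw [this]
  simp [sTo, ltT]

lemma foldMaxO_some_le : ∀ (l : List Int) (b : Int), ∃ m, foldMaxO (some b) l = some m ∧ b ≤ m
  | [], b => ⟨b, rfl, le_rfl⟩
  | a :: t, b => by
    obtain ⟨m, hm, hle⟩ := foldMaxO_some_le t (max b a)
    exact ⟨m, hm, le_trans (le_max_left _ _) hle⟩

lemma le_foldMaxO : ∀ (l : List Int) (o : Option Int) (x : Int), x ∈ l →
    ∃ m, foldMaxO o l = some m ∧ x ≤ m := by
  intro l
  induction l with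
  | nil => intro o x hx; cases hx
  | cons a t ih =>
    intro o x hx
    rcases List.mem_cons.mp hx with he | hmem
    · subst he
      cases o with
      | none => exact foldMaxO_some_le t x
      | some m0 =>
        obtain ⟨m, hm', hle⟩ := foldMaxO_some_le t (max m0 x)
        exact ⟨m, hm', le_trans (le_max_right _ _) hle⟩
    · cases o with
      | none => exact ih (some a) x hmem
      | some m0 => exact ih (some (max m0 a)) x hmem

lemma foldMaxO_some_ne_none : ∀ (l : List Int) (b : Int), foldMaxO (some b) l ≠ none
  | [], _ => by simp [foldMaxO]
  | x :: t, b => by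
    show foldMaxO (some (max b x)) t ≠ none
    exact foldMaxO_some_ne_none t (max b x)

lemma stackAt_pairwise (nums : List Int) (t : Nat) (ht : t ≤ nums.length) :
    (stackAt nums t).Pairwise (· < ·) := by
  unfold stackAt
  rw [List.pairwise_map]
  refine List.Pairwise.imp_of_mem ?_ ((List.pairwise_lt_range).filter _)
  intro k1 k2 h1 h2 hlt
  have hm2 := List.mem_filter.mp h2
  have hk2t : k2 < t := List.mem_range.mp hm2.1
  have hk2 : k2 < nums.length := by omega
  have hkeep := hm2.2
  unfold keepF at hkeep
  obtain ⟨hB, _⟩ := Bool.and_eq_true_iff.mp hkeep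
  have hmem : nums.getD k1 0 ∈ nums.take k2 := by
    have hk1 : k1 < nums.length := by omega
    have : (nums.take k2)[k1]'(by simp [List.length_take]; omega) = nums[k1] := by
      simp [List.getElem_take]
    rw [List.getD_eq_getElem _ _ hk1, ← this]
    exact List.getElem_mem _
  obtain ⟨m, hm, hle⟩ := le_foldMaxO (nums.take k2) none _ hmem
  rw [hm] at hB
  simp only [ltB, decide_eq_true_eq] at hB
  omega

lemma popGE_eq_filter (x : Int) : ∀ (l : List Int), l.Pairwise (· < ·) →
    popGE x l = l.filter (fun c => decide (c < x)) := by
  intro l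
  induction l using List.reverseRecOn with
  | nil => intro _; simp [popGE_nil]
  | append_singleton l c ih =>
    intro hp
    have hp' := hp.sublist (List.sublist_append_left l [c])
    have hall : ∀ a ∈ l, a < c := by
      intro a ha
      have := List.pairwise_append.mp hp
      exact this.2.2 a ha c (by simp)
    rw [popGE_concat]
    by_cases hx : x ≤ c
    · have : ¬ (c < x) := by omega
      simp [hx, List.filter_append, this, ih hp']
    · have hcx : c < x := by omega
      have : l.filter (fun c => decide (c < x)) = l := by
        refine List.filter_eq_self.mpr ?_
        intro a ha
        simp only [decide_eq_true_eq]
        exact lt_trans (hall a ha) hcx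
      simp [hx, List.filter_append, hcx, this]

lemma stack_inv (nums : List Int) : ∀ (t : Nat), t ≤ nums.length →
    (nums.take t).foldl altStep ((none : Option Int), [])
    = (foldMaxO none (nums.take t), stackAt nums t)
  | 0, _ => by simp [stackAt, foldMaxO]
  | t + 1, ht => by
    have htlt : t < nums.length := by omega
    have htake : nums.take (t + 1) = nums.take t ++ [nums.getD t 0] := by
      rw [List.take_succ_eq_append_getElem htlt, List.getD_eq_getElem _ _ htlt]
    set x := nums.getD t 0 with hxdef
    rw [htake, List.foldl_append, stack_inv nums t (by omega), foldMaxO_append]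
    simp only [List.foldl_cons, List.foldl_nil]
    -- the popped stack equals the filtered previous stack
    have hpop : popGE x (stackAt nums t)
        = ((List.range t).filter (fun k => keepF nums t k && decide (nums.getD k 0 < x))).map
            (fun k => nums.getD k 0) := by
      rw [popGE_eq_filter x _ (stackAt_pairwise nums t (by omega))]
      unfold stackAt
      rw [List.filter_map, List.filter_filter]
      congr 1
      refine List.filter_congr ?_
      intro k _
      simp [Function.comp, Bool.and_comm]
    have hstack : stackAt nums (t + 1)
        = ((List.range t).filter (fun k => keepF nums t k && decide (nums.getD k 0 < x))).map
            (fun k => nums.getD k 0)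
          ++ (if ltB (foldMaxO none (nums.take t)) x then [x] else []) := by
      unfold stackAt
      rw [List.range_succ, List.filter_append, List.map_append]
      congr 1
      · congr 1
        refine List.filter_congr ?_
        intro k hk
        exact keepF_lt nums t k (List.mem_range.mp hk) htlt
      · rw [show List.filter (keepF nums (t + 1)) [t] = if keepF nums (t + 1) t then [t] else [] by
          cases h : keepF nums (t + 1) t <;> simp [List.filter, h]]
        rw [keepF_self nums t htlt]
        split_ifs <;> simp [hxdef]
    unfold altStep
    cases hmo : foldMaxO none (nums.take t) with
    | none =>
      -- take t must be empty, so t = 0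
      have ht0 : t = 0 := by
        by_contra h0
        have hne : nums.take t ≠ [] := by
          intro e
          rcases List.take_eq_nil_iff.mp e with h | h
          · exact h0 h
          · rw [h] at htlt; simp at htlt
        cases hc : nums.take t with
        | nil => exact hne hc
        | cons a l =>
          rw [hc] at hmo
          exact foldMaxO_some_ne_none l a hmo
      subst ht0
      simp only [hmo, hpop, hstack]
      simp [ltB]
    | some m =>
      simp only [hmo, hpop, hstack]
      by_cases hmx : m < x
      · simp [hmx, ltB, max_eq_right (le_of_lt hmx)]
      · simp [hmx, ltB, max_eq_left (by omega : x ≤ m)]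

lemma canon_eq_stackAt (nums : List Int) : canon nums = stackAt nums nums.length := by
  unfold canon stackAt
  have : ∀ res : List Int, ∀ k : Nat, canonStep nums res k
      = if keepF nums nums.length k then res ++ [nums.getD k 0] else res := by
    intro res k
    unfold canonStep keepF
    rw [List.take_length]
  calc (List.range nums.length).foldl (canonStep nums) []
      = (List.range nums.length).foldl
          (fun res k => if keepF nums nums.length k then res ++ [nums.getD k 0] else res) [] := by
        refine PySem.List.foldl_congr_mem _ _ _ _ ?_
        intro acc k _
        exact this acc k
    _ = _ := by
        rw [PySem.List.foldl_append_if (keepF nums nums.length) (fun k => nums.getD k 0)]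
        simp

lemma B_eq_canon (nums : List Int) : slove_alt nums = canon nums := by
  unfold slove_alt
  have := stack_inv nums nums.length le_rfl
  rw [List.take_length] at this
  rw [this, canon_eq_stackAt]

-- ===== VERDICT (by name: the statement is the Claim_ definition above) =====
theorem slove_spec : Claim_equal_slove := by
  intro nums _ hpre
  unfold Spec_slove
  rw [A_eq_canon nums hpre, B_eq_canon]
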